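-- pv_equiv track=rewrite | github.com/adamtorres/inventory-yet-another-rewrite | inventory/management/commands/import.py | clean_unit_size
-- ===== SOURCE A (Python) =====
-- def clean_unit_size(raw_unit_size):
--     remove_chars = "0123456789. -/"
--     new_unit_size = raw_unit_size
--     for rc in remove_chars:
--         new_unit_size = new_unit_size.replace(rc, "")
--     if new_unit_size == '"':
--         new_unit_size = "in"
--     if new_unit_size == "-#":
--         # doesn't get here because "-" is in remove_chars
--         new_unit_size = "#avg"
--     if new_unit_size == "#":
--         new_unit_size = "lb"
--     if new_unit_size.startswith("#"):
--         new_unit_size = "lb " + new_unit_size[1:]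
--     return new_unit_size
-- ===== SOURCE B (Python) =====
-- def clean_unit_size(raw_unit_size):
--     kept = []
--     for c in raw_unit_size:
--         if not ('0' <= c <= '9' or c in '. -/'):
--             kept.append(c)
--     s = "".join(kept)
--     if s == '"':
--         return "in"
--     if s.startswith("#"):
--         return "lb " + s[1:] if len(s) > 1 else "lb"
--     return s
-- ===== Notes on version B (the rewrite author's own statement) =====
-- stated objective: idiomatic
-- what changed: B makes one accumulator pass over the characters with an arithmetic digit test (no 14 whole-string replace passes), then normalizes by early returns on the filtered result's shape, dropping A's dead branch that is unreachable because the dash is always filtered out.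
import Mathlib
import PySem

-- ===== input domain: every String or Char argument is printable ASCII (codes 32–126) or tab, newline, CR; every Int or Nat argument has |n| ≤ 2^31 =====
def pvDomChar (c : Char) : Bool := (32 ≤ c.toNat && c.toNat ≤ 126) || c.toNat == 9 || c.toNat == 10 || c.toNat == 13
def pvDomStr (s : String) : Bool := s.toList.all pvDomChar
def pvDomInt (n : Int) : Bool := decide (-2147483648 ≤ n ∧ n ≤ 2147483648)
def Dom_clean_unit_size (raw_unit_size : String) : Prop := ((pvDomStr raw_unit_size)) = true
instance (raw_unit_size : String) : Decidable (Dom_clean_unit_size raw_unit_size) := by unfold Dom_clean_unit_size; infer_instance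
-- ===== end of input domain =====

-- B removes the unwanted characters in one accumulator pass (arithmetic digit test) and normalizes by early returns on the filtered result's shape (dropping A's unreachable dash branch), instead of A's 14 successive whole-string replace passes plus a sequential if-chain.


-- ===== PORT A =====
def clean_unit_size (raw_unit_size : String) : String :=
  let remove_chars := "0123456789. -/".toList
  let n0 := remove_chars.foldl (fun s rc => PySem.Chars.replace s [rc] []) raw_unit_size.toList
  let n1 := if n0 = "\"".toList then "in".toList else n0
  let n2 := if n1 = "-#".toList then "#avg".toList else n1
  let n3 := if n2 = "#".toList then "lb".toList else n2
  let n4 := if PySem.Chars.startswith n3 "#".toList then "lb ".toList ++ PySem.List.slice n3 (some 1) none else n3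
  String.mk n4

-- ===== PORT B =====
-- keep test of Source B: not (digit by range test, or one of ". -/")
def cusAltKeep (c : Char) : Bool :=
  !(('0' ≤ c && c ≤ '9') || c = '.' || c = ' ' || c = '-' || c = '/')

-- the accumulator loop of Source B: kept characters collected front to back
def cusAltGather : List Char → List Char → List Char
  | acc, [] => acc.reverse
  | acc, c :: t => cusAltGather (if cusAltKeep c then c :: acc else acc) t

def clean_unit_size_alt (raw_unit_size : String) : String :=
  let s := cusAltGather [] raw_unit_size.toList
  if s = "\"".toList then "in"
  else if PySem.Chars.startswith s "#".toList then
    if s.length > 1 then String.mk ("lb ".toList ++ PySem.List.slice s (some 1) none) else "lb"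
  else String.mk s

-- ===== PRECONDITION & SPEC =====
def Spec_clean_unit_size (raw_unit_size : String) (out : String) : Prop := out = clean_unit_size_alt raw_unit_size
instance (raw_unit_size : String) (out : String) : Decidable (Spec_clean_unit_size raw_unit_size out) := by unfold Spec_clean_unit_size; infer_instance

-- ===== CLAIM (what is proved, stated in full; the proofs are below) =====
def Claim_equal_clean_unit_size : Prop := ∀ (raw_unit_size : String), Dom_clean_unit_size raw_unit_size → Spec_clean_unit_size raw_unit_size (clean_unit_size raw_unit_size)

-- ===== LEMMAS AND PROOFS =====

-- replace.go with a single-char pattern and empty replacement just filters that char out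
theorem cus_go_filter (rc : Char) : ∀ (fuel : Nat) (l acc : List Char), l.length ≤ fuel →
    PySem.Chars.replace.go [rc] [] fuel l acc = acc.reverse ++ l.filter (fun c => c ≠ rc) := by
  intro fuel
  induction fuel with
  | zero => intro l acc h; cases l with
    | nil => simp [PySem.Chars.replace.go]
    | cons c t => simp at h
  | succ n ih =>
    intro l acc h
    cases l with
    | nil => simp [PySem.Chars.replace.go]
    | cons c t =>
      simp only [PySem.Chars.replace.go]
      by_cases hc : c = rc
      · subst hc
        have : List.isPrefixOf [c] (c :: t) = true := by simp [List.isPrefixOf]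
        rw [if_pos this]
        simp only [List.length, List.drop, List.reverse_nil, List.nil_append]
        rw [ih t acc (by simpa using Nat.le_of_succ_le_succ h)]
        simp [List.filter]
      · have : List.isPrefixOf [rc] (c :: t) = false := by
          simp [List.isPrefixOf, Ne.symm hc]
        rw [this]
        simp only [Bool.false_eq_true, if_false]
        rw [ih t (c :: acc) (by simpa using Nat.le_of_succ_le_succ h)]
        simp [List.filter, hc]

theorem cus_replace_filter (rc : Char) (l : List Char) :
    PySem.Chars.replace l [rc] [] = l.filter (fun c => c ≠ rc) := by
  have := cus_go_filter rc l.length l [] (le_refl _)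
  simpa [PySem.Chars.replace] using this

-- A's 14 successive replace passes amount to one filter
theorem cus_foldl_filter (rcs : List Char) : ∀ (l : List Char),
    rcs.foldl (fun s rc => PySem.Chars.replace s [rc] []) l
      = l.filter (fun c => !(rcs.contains c)) := by
  induction rcs with
  | nil => intro l; simp
  | cons r rs ih =>
    intro l
    rw [List.foldl_cons, cus_replace_filter, ih, List.filter_filter]
    apply List.filter_congr
    intro c _
    by_cases h : c = r <;> simp [h]

-- B's accumulator loop is also a filter
theorem cus_gather_filter : ∀ (l acc : List Char),
    cusAltGather acc l = acc.reverse ++ l.filter cusAltKeep := by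
  intro l
  induction l with
  | nil => intro acc; simp [cusAltGather]
  | cons c t ih =>
    intro acc
    simp only [cusAltGather]
    cases h : cusAltKeep c
    · rw [if_neg (by simp [h]), ih]; simp [List.filter, h]
    · rw [if_pos rfl, ih]; simp [List.filter, h]

theorem cus_char_eq_toNat (c d : Char) : (c = d) ↔ c.toNat = d.toNat := by
  constructor
  · intro h; rw [h]
  · intro h; exact Char.ext (by exact_mod_cast UInt32.toNat_inj.mp h)

theorem cus_char_le_toNat (c d : Char) : (c ≤ d) ↔ c.toNat ≤ d.toNat := by
  rw [Char.le_def, UInt32.le_iff_toNat_le]; rfl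

-- the two filter predicates agree on every character
theorem cus_pred_eq (c : Char) :
    (!("0123456789. -/".toList.contains c)) = cusAltKeep c := by
  rw [Bool.eq_iff_iff]
  simp only [Bool.not_eq_true', cusAltKeep, Bool.or_eq_false_iff, Bool.and_eq_false_iff,
    List.contains_eq_mem, decide_eq_false_iff_not,
    show "0123456789. -/".toList = ['0','1','2','3','4','5','6','7','8','9','.',' ','-','/'] from rfl,
    List.mem_cons, List.not_mem_nil, cus_char_eq_toNat, cus_char_le_toNat, not_or,
    show (' ' : Char).toNat = 32 from rfl, show ('-' : Char).toNat = 45 from rfl,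
    show ('.' : Char).toNat = 46 from rfl, show ('/' : Char).toNat = 47 from rfl,
    show ('0' : Char).toNat = 48 from rfl, show ('1' : Char).toNat = 49 from rfl,
    show ('2' : Char).toNat = 50 from rfl, show ('3' : Char).toNat = 51 from rfl,
    show ('4' : Char).toNat = 52 from rfl, show ('5' : Char).toNat = 53 from rfl,
    show ('6' : Char).toNat = 54 from rfl, show ('7' : Char).toNat = 55 from rfl,
    show ('8' : Char).toNat = 56 from rfl, show ('9' : Char).toNat = 57 from rfl]
  simp only [not_false_iff, and_true]
  omega

-- '-' never survives the filter, so A's dash-hash branch is unreachable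
theorem cus_no_dash (l : List Char) : '-' ∉ l.filter cusAltKeep := by
  intro h
  have := (List.mem_filter.mp h).2
  simp [cusAltKeep] at this

-- the two normalizations agree on any list not containing '-'
theorem cus_norm_eq (s : List Char) (hd : '-' ∉ s) :
    (let n1 := if s = "\"".toList then "in".toList else s
     let n2 := if n1 = "-#".toList then "#avg".toList else n1
     let n3 := if n2 = "#".toList then "lb".toList else n2
     String.mk (if PySem.Chars.startswith n3 "#".toList then "lb ".toList ++ PySem.List.slice n3 (some 1) none else n3))
    = (if s = "\"".toList then "in"
       else if PySem.Chars.startswith s "#".toList then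
         if s.length > 1 then String.mk ("lb ".toList ++ PySem.List.slice s (some 1) none) else "lb"
       else String.mk s) := by
  by_cases hq : s = "\"".toList
  · subst hq; decide
  · have hnd : s ≠ "-#".toList := by
      intro h; exact hd (h ▸ (by decide : '-' ∈ "-#".toList))
    by_cases hsw : PySem.Chars.startswith s "#".toList = true
    · obtain ⟨t, rfl⟩ : ∃ t, s = '#' :: t := by
        cases s with
        | nil => simp [PySem.Chars.startswith, List.isPrefixOf] at hsw
        | cons c t =>
          have : c = '#' := by
            by_contra hne
            simp [PySem.Chars.startswith, List.isPrefixOf, hne] at hsw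
            exact hne hsw.symm
          exact ⟨t, by rw [this]⟩
      cases t with
      | nil => simp only []; rw [if_neg hq, if_neg hnd]; decide
      | cons r t' =>
        have hp : ('#' :: r :: t') ≠ "#".toList := by simp
        simp only []
        rw [if_neg hq, if_neg hnd, if_neg hp, if_pos hsw, if_neg hq, if_pos hsw,
          if_pos (by simp)]
    · have hp : s ≠ "#".toList := by
        intro h; subst h; exact hsw (by decide)
      simp only []
      rw [if_neg hq, if_neg hnd, if_neg hp, if_neg (by simpa using hsw), if_neg hq,
        if_neg (by simpa using hsw)]

-- ===== VERDICT (by name: the statement is the Claim_ definition above) =====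
theorem clean_unit_size_spec : Claim_equal_clean_unit_size := by
  intro raw _
  show clean_unit_size raw = clean_unit_size_alt raw
  simp only [clean_unit_size, clean_unit_size_alt, cus_foldl_filter, cus_gather_filter,
    List.reverse_nil, List.nil_append]
  have hp : (fun c => !("0123456789. -/".toList.contains c)) = cusAltKeep := funext cus_pred_eq
  rw [hp]
  exact cus_norm_eq _ (cus_no_dash raw.toList)
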